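-- pv_equiv track=rewrite | github.com/reichert-science-intelligence/starguard-desktop | apply_home_page_fixes_to_all_pages.py | add_starguard_header
-- ===== SOURCE A (Python) =====
-- STARGUARD_HEADER = """
-- # StarGuard Header HTML (CSS already defined in Nuclear Option above)
-- st.markdown(\"\"\"
-- <div class='starguard-header-container'>
--     <div class='starguard-title'>⭐ StarGuard AI | Turning Data Into Stars</div>
--     <div class='starguard-subtitle'>Powered by Predictive Analytics & Machine Learning | Healthcare AI Architect | $148M+ Savings in HEDIS & Star Ratings | Context Engineering + Agentic RAG</div>
-- </div>
-- \"\"\", unsafe_allow_html=True)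
--
-- st.markdown("---")
-- """
--
-- def add_starguard_header(content):
--     """Add StarGuard header HTML after imports and before main content"""
--     # Check if header already exists
--     if 'starguard-header-container' in content:
--         return content, False
--
--     # Find a good insertion point - after st.set_page_config and CSS blocks
--     # Look for pattern: after closing </style> tag, before imports or main code
--
--     lines = content.split('\n')
--     new_lines = []
--     i = 0
--     inserted = False
--
--     while i < len(lines):
--         line = lines[i]
--         new_lines.append(line)
--
--         # Look for closing </style> tag followed by imports or main code
--         if line.strip() == '</style>' and not inserted:
--             # Check if next non-empty line is import or main code
--             j = i + 1
--             while j < len(lines) and lines[j].strip() == '':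
--                 j += 1
--
--             if j < len(lines):
--                 next_line = lines[j].strip()
--                 # If next line is import or starts main code, insert header here
--                 if (next_line.startswith('import ') or
--                     next_line.startswith('from ') or
--                     next_line.startswith('# ') or
--                     next_line.startswith('st.') or
--                     next_line.startswith('def ') or
--                     next_line.startswith('class ')):
--                     # Insert header after this </style> block
--                     new_lines.append('')
--                     new_lines.append(STARGUARD_HEADER.strip())
--                     inserted = True
--
--         i += 1
--
--     # If not inserted yet, try to insert after first CSS block
--     if not inserted:
--         for i, line in enumerate(new_lines):
--             if '</style>' in line and 'unsafe_allow_html=True' in new_lines[min(i+1, len(new_lines)-1)]: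
--                 # Insert after this CSS block
--                 insert_pos = i + 2
--                 new_lines.insert(insert_pos, '')
--                 new_lines.insert(insert_pos + 1, STARGUARD_HEADER.strip())
--                 inserted = True
--                 break
--
--     return '\n'.join(new_lines), inserted
-- ===== SOURCE B (Python) =====
-- STARGUARD_HEADER = """
-- # StarGuard Header HTML (CSS already defined in Nuclear Option above)
-- st.markdown(\"\"\"
-- <div class='starguard-header-container'>
--     <div class='starguard-title'>⭐ StarGuard AI | Turning Data Into Stars</div>
--     <div class='starguard-subtitle'>Powered by Predictive Analytics & Machine Learning | Healthcare AI Architect | $148M+ Savings in HEDIS & Star Ratings | Context Engineering + Agentic RAG</div>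
-- </div>
-- \"\"\", unsafe_allow_html=True)
--
-- st.markdown("---")
-- """
--
-- _PREFIXES = ('import ', 'from ', '# ', 'st.', 'def ', 'class ')
--
--
-- def add_starguard_header(content):
--     """Add StarGuard header HTML after imports and before main content"""
--     if 'starguard-header-container' in content:
--         return content, False
--
--     lines = content.split('\n')
--     n = len(lines)
--
--     # One backward pass: nxt[i] = stripped text of the first non-empty line
--     # after position i, or None if there is none.
--     nxt = [None] * n
--     later = None
--     for i in range(n - 1, -1, -1):
--         nxt[i] = later
--         s = lines[i].strip()
--         if s:
--             later = s
--
--     # Primary rule: first '</style>' line whose next non-empty line starts code.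
--     for i in range(n):
--         if lines[i].strip() == '</style>' and nxt[i] is not None \
--                 and nxt[i].startswith(_PREFIXES):
--             out = lines[:i + 1] + ['', STARGUARD_HEADER.strip()] + lines[i + 1:]
--             return '\n'.join(out), True
--
--     # Fallback rule: a line containing '</style>' followed by the markdown call.
--     for i in range(n):
--         if '</style>' in lines[i] and 'unsafe_allow_html=True' in lines[min(i + 1, n - 1)]:
--             out = lines[:i + 2] + ['', STARGUARD_HEADER.strip()] + lines[i + 2:]
--             return '\n'.join(out), True
--
--     return content, False
-- ===== Notes on version B (the rewrite author's own statement) =====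
-- stated objective: alternative
-- what changed: A's single forward copy-loop with an inserted flag and per-hit blank-line lookahead is replaced by locate-then-splice: one backward pass precomputes each line's next non-empty stripped line, then the insertion index is found and the list is spliced with take/drop (the fallback likewise becomes find-first-index then splice, and the no-insertion case returns the content unchanged instead of rejoining the lines).
import Mathlib
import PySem

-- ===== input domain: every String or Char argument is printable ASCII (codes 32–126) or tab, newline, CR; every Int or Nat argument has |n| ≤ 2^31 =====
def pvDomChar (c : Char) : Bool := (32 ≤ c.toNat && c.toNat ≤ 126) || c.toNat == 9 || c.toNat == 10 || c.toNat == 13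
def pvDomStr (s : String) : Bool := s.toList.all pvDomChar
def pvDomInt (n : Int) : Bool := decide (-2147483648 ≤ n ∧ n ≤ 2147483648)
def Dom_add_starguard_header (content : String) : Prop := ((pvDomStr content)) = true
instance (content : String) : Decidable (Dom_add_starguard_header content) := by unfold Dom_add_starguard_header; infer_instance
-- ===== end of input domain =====

-- B restructures A's append-each-line-while-scanning loop into "compute the insertion
-- index (with a single backward pass for the next-non-empty-line lookahead), then splice";
-- objective: alternative decomposition, same asymptotic cost.

-- module constant STARGUARD_HEADER (shared by both Pythons)
def pvSTARGUARD_HEADER : String := "\n# StarGuard Header HTML (CSS already defined in Nuclear Option above)\nst.markdown(\"\"\"\n<div class='starguard-header-container'>\n    <div class='starguard-title'>⭐ StarGuard AI | Turning Data Into Stars</div>\n    <div class='starguard-subtitle'>Powered by Predictive Analytics & Machine Learning | Healthcare AI Architect | $148M+ Savings in HEDIS & Star Ratings | Context Engineering + Agentic RAG</div>\n</div>\n\"\"\", unsafe_allow_html=True)\n\nst.markdown(\"---\")\n"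

-- STARGUARD_HEADER.strip() (computed at the insertion site in both Pythons)
def pvHdr : String := PySem.Str.strip pvSTARGUARD_HEADER

-- the fallback-scan condition (same textual test in both Pythons, scanned differently)
def pvFallCond (nl : List String) (i : Nat) : Bool :=
  PySem.Str.isIn "</style>" (nl.getD i "") &&
  PySem.Str.isIn "unsafe_allow_html=True" (nl.getD (min (i + 1) (nl.length - 1)) "")

-- ===== PORT A =====
-- A's chain of or-ed startswith tests
def aPrefixOk (s : String) : Bool :=
  PySem.Str.startswith s "import " || PySem.Str.startswith s "from " ||
  PySem.Str.startswith s "# " || PySem.Str.startswith s "st." ||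
  PySem.Str.startswith s "def " || PySem.Str.startswith s "class "

-- A's inner while loop: skip blank lines, return the next stripped non-empty line
def aNext : List String → Option String
  | [] => none
  | l :: rs => if PySem.Str.strip l = "" then aNext rs else some (PySem.Str.strip l)

-- A's main while loop: copy lines, inserting the header after the matching '</style>'
def aLoop : List String → Bool → List String × Bool
  | [], ins => ([], ins)
  | l :: rest, ins =>
    if PySem.Str.strip l == "</style>" && !ins then
      match aNext rest with
      | some nl =>
        if aPrefixOk nl then
          let r := aLoop rest true
          (l :: "" :: pvHdr :: r.1, r.2)
        else
          let r := aLoop rest ins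
          (l :: r.1, r.2)
      | none =>
        let r := aLoop rest ins
        (l :: r.1, r.2)
    else
      let r := aLoop rest ins
      (l :: r.1, r.2)

-- A's fallback for-loop with break: insert '' at i+2 and the header at i+3 at the first hit
def aFall (nl : List String) (i : Nat) : List String × Bool :=
  if i < nl.length then
    if pvFallCond nl i then
      (PySem.List.insert (PySem.List.insert nl ((i : Int) + 2) "") ((i : Int) + 3) pvHdr, true)
    else aFall nl (i + 1)
  else (nl, false)
termination_by nl.length - i

def add_starguard_header (content : String) : String × Bool :=
  if PySem.Str.isIn "starguard-header-container" content then (content, false)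
  else
    let lines := (PySem.Str.split? content "\n").getD []
    let r := aLoop lines false
    if r.2 then (PySem.Str.join "\n" r.1, r.2)
    else
      let f := aFall r.1 0
      (PySem.Str.join "\n" f.1, f.2)

-- ===== PORT B =====
-- B's tuple-startswith test
def bPrefixOk (s : String) : Bool :=
  ["import ", "from ", "# ", "st.", "def ", "class "].any (fun p => PySem.Str.startswith s p)

-- B's single backward pass: each line paired with the stripped first non-empty line after it
-- (.2 is the running "first non-empty stripped line of this suffix")
def bNxt : List String → List (String × Option String) × Option String
  | [] => ([], none)
  | l :: rest =>
    let r := bNxt rest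
    ((l, r.2) :: r.1, if PySem.Str.strip l = "" then r.2 else some (PySem.Str.strip l))

-- B's primary-rule test on (line, next-non-empty)
def bCond (p : String × Option String) : Bool :=
  PySem.Str.strip p.1 == "</style>" &&
  (match p.2 with
   | some s => bPrefixOk s
   | none => false)

def add_starguard_header_alt (content : String) : String × Bool :=
  if PySem.Str.isIn "starguard-header-container" content then (content, false)
  else
    let lines := (PySem.Str.split? content "\n").getD []
    match (bNxt lines).1.findIdx? bCond with
    | some i =>
      (PySem.Str.join "\n" (lines.take (i + 1) ++ "" :: pvHdr :: lines.drop (i + 1)), true)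
    | none =>
      match (List.range lines.length).find? (pvFallCond lines) with
      | some i =>
        (PySem.Str.join "\n" (lines.take (i + 2) ++ "" :: pvHdr :: lines.drop (i + 2)), true)
      | none => (content, false)

-- ===== PRECONDITION & SPEC =====
def Spec_add_starguard_header (content : String) (out : String × Bool) : Prop := out = add_starguard_header_alt content
instance (content : String) (out : String × Bool) : Decidable (Spec_add_starguard_header content out) := by unfold Spec_add_starguard_header; infer_instance

-- ===== CLAIM (what is proved, stated in full; the proofs are below) =====
def Claim_equal_add_starguard_header : Prop := ∀ (content : String), Dom_add_starguard_header content → Spec_add_starguard_header content (add_starguard_header content)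

-- ===== LEMMAS AND PROOFS =====

-- the two prefix tests agree
lemma prefixOk_eq (s : String) : aPrefixOk s = bPrefixOk s := by
  simp [aPrefixOk, bPrefixOk, Bool.or_assoc]

-- A's lookahead equals B's backward-pass accumulator
lemma aNext_eq_bNxt (xs : List String) : aNext xs = (bNxt xs).2 := by
  induction xs with
  | nil => rfl
  | cons l rs ih =>
    simp only [aNext, bNxt]
    split_ifs <;> simp [ih]

-- once inserted, A's loop just copies
lemma aLoop_true (xs : List String) : aLoop xs true = (xs, true) := by
  induction xs with
  | nil => rfl
  | cons l rs ih => simp [aLoop, ih]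

-- A's main loop = find-first-index-then-splice
lemma aLoop_false (xs : List String) :
    aLoop xs false =
      match (bNxt xs).1.findIdx? bCond with
      | some i => (xs.take (i + 1) ++ "" :: pvHdr :: xs.drop (i + 1), true)
      | none => (xs, false) := by
  induction xs with
  | nil => rfl
  | cons l rs ih =>
    simp only [bNxt, List.findIdx?_cons]
    by_cases hc : bCond (l, (bNxt rs).2)
    · rw [if_pos hc]
      have h1 : PySem.Str.strip l == "</style>" := by
        simp only [bCond] at hc; exact (Bool.and_eq_true_iff.mp hc).1
      obtain ⟨s, hs⟩ : ∃ s, (bNxt rs).2 = some s := by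
        simp only [bCond] at hc
        cases h : (bNxt rs).2 <;> simp [h] at hc ⊢
      have h2 : bPrefixOk s := by
        simp only [bCond, hs] at hc; simpa using (Bool.and_eq_true_iff.mp hc).2
      simp only [aLoop, h1, Bool.not_false, Bool.and_true,
        aNext_eq_bNxt, hs, prefixOk_eq, h2, aLoop_true]
      rfl
    · rw [if_neg hc]
      have key : aLoop (l :: rs) false = (let r := aLoop rs false; (l :: r.1, r.2)) := by
        simp only [aLoop]
        by_cases h1 : PySem.Str.strip l == "</style>"
        · simp only [h1, Bool.not_false, Bool.and_true, if_pos]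
          rw [aNext_eq_bNxt]
          cases h : (bNxt rs).2 with
          | none => rfl
          | some s =>
            have h2 : aPrefixOk s = false := by
              by_contra hne
              apply hc
              simp only [bCond, h1, h, Bool.true_and]
              rw [← prefixOk_eq]
              simpa using hne
            simp [h2]
        · simp [h1]
      rw [key, ih]
      cases h : (bNxt rs).1.findIdx? bCond <;> simp

-- Python list.insert at a Nat position (clamping past the end, as take/drop do)
lemma insert_nat (xs : List String) (p : Nat) (v : String) :
    PySem.List.insert xs (p : Int) v = xs.take p ++ v :: xs.drop p := by
  by_cases h : p ≤ xs.length
  · exact PySem.List.insert_natCast xs p v h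
  · rw [Nat.not_le] at h
    simp only [PySem.List.insert, PySem.List.sliceIndices]
    norm_num
    rw [if_neg (by omega : ¬ ((p : Int) < 0)),
      (by omega : min (p : Int) (xs.length : Int) = (xs.length : Int))]
    simp [List.take_of_length_le (Nat.le_of_lt h), List.drop_eq_nil_of_le (Nat.le_of_lt h)]

-- the two successive inserts are one splice
lemma double_insert (nl : List String) (i : Nat) :
    PySem.List.insert (PySem.List.insert nl ((i : Int) + 2) "") ((i : Int) + 3) pvHdr =
      nl.take (i + 2) ++ "" :: pvHdr :: nl.drop (i + 2) := by
  have e2 : ((i : Int) + 2) = ((i + 2 : Nat) : Int) := by push_cast; ring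
  have e3 : ((i : Int) + 3) = ((i + 3 : Nat) : Int) := by push_cast; ring
  rw [e2, e3, insert_nat, insert_nat]
  by_cases h : i + 2 ≤ nl.length
  · have hl : (nl.take (i + 2)).length = i + 2 := by simp [h]
    rw [List.take_append, List.drop_append, hl]
    rw [List.take_of_length_le (by omega : (nl.take (i+2)).length ≤ i + 3),
      List.drop_eq_nil_of_le (by omega : (nl.take (i+2)).length ≤ i + 3)]
    simp [(by omega : i + 3 - (i + 2) = 1)]
  · rw [Nat.not_le] at h
    have h1 : nl.take (i + 2) = nl := List.take_of_length_le (by omega)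
    have h2 : nl.drop (i + 2) = [] := List.drop_eq_nil_of_le (by omega)
    rw [h1, h2, List.take_append, List.drop_append,
      List.take_of_length_le (by omega : nl.length ≤ i + 3),
      List.drop_eq_nil_of_le (by omega : nl.length ≤ i + 3)]
    have h3 : 2 ≤ i + 3 - nl.length := by omega
    rcases Nat.exists_eq_add_of_le h3 with ⟨k, hk⟩
    rw [hk, List.take_of_length_le (by simp; omega), List.drop_eq_nil_of_le (by simp; omega)]
    simp

-- A's fallback loop = find-first-index-then-splice, from any start index
lemma aFall_eq (nl : List String) (i : Nat) :
    aFall nl i =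
      match (List.range' i (nl.length - i)).find? (pvFallCond nl) with
      | some j => (nl.take (j + 2) ++ "" :: pvHdr :: nl.drop (j + 2), true)
      | none => (nl, false) := by
  suffices H : ∀ (n i : Nat), nl.length - i = n →
      aFall nl i =
        match (List.range' i n).find? (pvFallCond nl) with
        | some j => (nl.take (j + 2) ++ "" :: pvHdr :: nl.drop (j + 2), true)
        | none => (nl, false) by
    exact H _ i rfl
  intro n
  induction n with
  | zero =>
    intro i h
    have hi : ¬ i < nl.length := by omega
    unfold aFall
    simp [hi]
  | succ n ih =>
    intro i h
    have hi : i < nl.length := by omega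
    unfold aFall
    rw [if_pos hi, List.range'_succ]
    by_cases hc : pvFallCond nl i
    · rw [if_pos hc]
      simp [hc, double_insert]
    · rw [if_neg hc, ih (i + 1) (by omega)]
      simp [hc]

-- Chars: joining the pieces of go restores the text
lemma join_cons_ne_nil (sep x : List Char) (ys : List (List Char)) (h : ys ≠ []) :
    PySem.Chars.join sep (x :: ys) = x ++ sep ++ PySem.Chars.join sep ys := by
  cases ys with
  | nil => exact absurd rfl h
  | cons q rest => exact PySem.Chars.join_cons_cons sep x q rest

lemma join_merge (sep : List Char) (xs : List (List Char)) (a b : List Char) :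
    PySem.Chars.join sep (xs ++ [a, b]) = PySem.Chars.join sep (xs ++ [a ++ sep ++ b]) := by
  induction xs with
  | nil => simp [PySem.Chars.join_cons_cons, PySem.Chars.join_singleton]
  | cons x xs ih =>
    rw [List.cons_append, List.cons_append,
      join_cons_ne_nil sep x _ (by simp), join_cons_ne_nil sep x _ (by simp), ih]

lemma go_join (sep : List Char) (hsep : sep ≠ []) :
    ∀ (fuel : Nat) (l cur : List Char) (acc : List (List Char)), l.length ≤ fuel →
      PySem.Chars.join sep (PySem.Chars.splitOn.go sep fuel l cur acc) =
        PySem.Chars.join sep (acc.reverse ++ [cur.reverse ++ l]) := by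
  intro fuel
  induction fuel with
  | zero =>
    intro l cur acc _
    have e : PySem.Chars.splitOn.go sep 0 l cur acc = ((cur.reverse ++ l) :: acc).reverse := rfl
    rw [e]; simp
  | succ f ih =>
    intro l cur acc h
    cases l with
    | nil =>
      have e : PySem.Chars.splitOn.go sep (f + 1) [] cur acc = (cur.reverse :: acc).reverse := rfl
      rw [e]; simp
    | cons c rest =>
      have e : PySem.Chars.splitOn.go sep (f + 1) (c :: rest) cur acc =
          (if sep.isPrefixOf (c :: rest) then
            PySem.Chars.splitOn.go sep f (List.drop sep.length (c :: rest)) [] (cur.reverse :: acc)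
          else PySem.Chars.splitOn.go sep f rest (c :: cur) acc) := rfl
      rw [e]
      by_cases hp : sep.isPrefixOf (c :: rest)
      · rw [if_pos hp]
        obtain ⟨t, ht⟩ := List.isPrefixOf_iff_prefix.mp hp
        have hlen : 1 ≤ sep.length := by
          cases sep with
          | nil => exact absurd rfl hsep
          | cons _ _ => simp
        have hdl : List.drop sep.length (c :: rest) = t := by rw [← ht]; simp
        have hlt : (List.drop sep.length (c :: rest)).length ≤ f := by
          have hlc : (c :: rest).length = sep.length + t.length := by rw [← ht]; simp
          rw [hdl]
          simp at hlc h ⊢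
          omega
        rw [ih _ _ _ hlt, hdl]
        have e2 : (cur.reverse :: acc).reverse ++ [List.reverse [] ++ t] =
            acc.reverse ++ [cur.reverse, t] := by simp
        rw [e2, join_merge]
        have e3 : cur.reverse ++ (c :: rest) = cur.reverse ++ sep ++ t := by
          rw [← ht]; simp
        rw [e3]
      · rw [if_neg hp, ih _ _ _ (by simp at h ⊢; omega)]
        simp

-- joining '\n' over split('\n') restores the content
lemma join_split (content : String) :
    PySem.Str.join "\n" ((PySem.Str.split? content "\n").getD []) = content := by
  have hsep : ("\n" : String).toList = ['\n'] := by decide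
  have h := go_join ['\n'] (by simp) (content.toList.length + 1) content.toList [] [] (by omega)
  simp only [List.reverse_nil, List.nil_append] at h
  rw [PySem.Chars.join_singleton] at h
  rw [show (PySem.Str.split? content "\n") =
    some (List.map String.ofList (PySem.Chars.splitOn content.toList ['\n'])) from rfl]
  simp only [Option.getD_some, PySem.Str.join, hsep, List.map_map]
  have e : List.map (String.toList ∘ String.ofList) (PySem.Chars.splitOn content.toList ['\n']) =
      PySem.Chars.splitOn content.toList ['\n'] := by
    simp [Function.comp_def]
  rw [e]
  rw [show PySem.Chars.splitOn content.toList ['\n'] =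
    PySem.Chars.splitOn.go ['\n'] (content.toList.length + 1) content.toList [] [] from rfl]
  rw [h, String.ofList_toList]

-- ===== VERDICT (by name: the statement is the Claim_ definition above) =====
theorem add_starguard_header_spec : Claim_equal_add_starguard_header := by
  intro content _
  unfold Spec_add_starguard_header add_starguard_header add_starguard_header_alt
  by_cases h0 : PySem.Str.isIn "starguard-header-container" content
  · rw [if_pos h0, if_pos h0]
  · rw [if_neg h0, if_neg h0]
    simp only [aLoop_false]
    cases h1 : (bNxt ((PySem.Str.split? content "\n").getD [])).1.findIdx? bCond with
    | some i => simp
    | none =>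
      simp only [aFall_eq]
      simp only [Nat.sub_zero, ← List.range_eq_range']
      cases h2 : (List.range ((PySem.Str.split? content "\n").getD []).length).find?
          (pvFallCond ((PySem.Str.split? content "\n").getD [])) with
      | some j => simp
      | none => simp [join_split]
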